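-- pv_equiv track=rewrite | github.com/yaplx/aiconference | backend.py | _is_valid_numbered_header
-- ===== SOURCE A (Python) =====
-- IGNORE_CAPTION_KEYWORDS = [
--     "FIGURE", "FIG", "FIG.", "TABLE", "TAB", "TAB.",
--     "IMAGE", "IMG", "IMG.", "CHART", "GRAPH", "DIAGRAM", "EQ", "EQUATION"
-- ]
--
-- def roman_to_int(s):
--     roman_map = {'I': 1, 'V': 5, 'X': 10, 'L': 50, 'C': 100, 'D': 500, 'M': 1000}
--     s = s.upper()
--     total = 0
--     prev_value = 0
--     try:
--         for char in reversed(s):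
--             if char not in roman_map: return None
--             value = roman_map[char]
--             if value < prev_value:
--                 total -= value
--             else:
--                 total += value
--             prev_value = value
--         return total
--     except:
--         return None
--
-- def _is_valid_numbered_header(num_str, phrase, expected_number):
--     if len(phrase) >= 30: return False
--     clean_phrase = phrase.upper().strip()
--     for keyword in IGNORE_CAPTION_KEYWORDS:
--         if clean_phrase.startswith(keyword): return False
--     current_val = 0
--     if num_str.isdigit():
--         current_val = int(num_str)
--     else:
--         val = roman_to_int(num_str)
--         if val is None: return False
--         current_val = val
--     return current_val == expected_number
-- ===== SOURCE B (Python) =====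
-- IGNORE_CAPTION_KEYWORDS = [
--     "FIGURE", "FIG", "FIG.", "TABLE", "TAB", "TAB.",
--     "IMAGE", "IMG", "IMG.", "CHART", "GRAPH", "DIAGRAM", "EQ", "EQUATION"
-- ]
--
-- def _roman_value(c):
--     if c == 'I': return 1
--     if c == 'V': return 5
--     if c == 'X': return 10
--     if c == 'L': return 50
--     if c == 'C': return 100
--     if c == 'D': return 500
--     if c == 'M': return 1000
--     return None
--
-- def _parse_number(num_str):
--     if num_str.isdigit():
--         return int(num_str)
--     vals = []
--     for ch in num_str.upper():
--         v = _roman_value(ch)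
--         if v is None:
--             return None
--         vals.append(v)
--     return sum(-v if v < nxt else v for v, nxt in zip(vals, vals[1:] + [0]))
--
-- def _is_valid_numbered_header(num_str, phrase, expected_number):
--     clean = phrase.upper().strip()
--     return (len(phrase) < 30
--             and not any(clean.startswith(k) for k in IGNORE_CAPTION_KEYWORDS)
--             and _parse_number(num_str) == expected_number)
-- ===== Notes on version B (the rewrite author's own statement) =====
-- stated objective: alternative
-- what changed: Roman parsing becomes a value-list pass followed by one signed sum over adjacent pairs (zip with the shifted list) instead of A's reversed loop with a carried prev accumulator; the lookup dict becomes an if/elif value function, and the validator shell becomes a single boolean conjunction around an Option-returning parse helper instead of A's early-return cascade.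
import Mathlib
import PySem

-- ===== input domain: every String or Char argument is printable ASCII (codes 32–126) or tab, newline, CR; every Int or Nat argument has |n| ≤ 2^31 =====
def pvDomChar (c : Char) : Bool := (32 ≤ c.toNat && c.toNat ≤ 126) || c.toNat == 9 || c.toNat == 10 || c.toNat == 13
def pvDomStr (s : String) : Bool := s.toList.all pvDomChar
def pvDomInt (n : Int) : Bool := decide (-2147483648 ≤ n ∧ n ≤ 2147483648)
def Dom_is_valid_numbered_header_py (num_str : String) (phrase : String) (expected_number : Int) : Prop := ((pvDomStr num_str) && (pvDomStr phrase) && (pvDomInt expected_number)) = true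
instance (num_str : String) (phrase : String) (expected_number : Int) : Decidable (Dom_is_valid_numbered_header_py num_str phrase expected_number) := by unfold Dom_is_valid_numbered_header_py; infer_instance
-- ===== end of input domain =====

-- B restructures A: roman parsing becomes a value-list pass followed by one signed sum over
-- adjacent pairs (zip with the shifted list) instead of A's reversed loop with a carried prev
-- accumulator; the validator shell becomes a single boolean conjunction with a parse helper
-- returning Option, instead of A's early-return cascade. Same cost, different decomposition.

-- ===== PORT A =====
def pvKeywords : List String :=
  ["FIGURE", "FIG", "FIG.", "TABLE", "TAB", "TAB.",
   "IMAGE", "IMG", "IMG.", "CHART", "GRAPH", "DIAGRAM", "EQ", "EQUATION"]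

def pvRomanMap : PySem.Dict Char Int :=
  PySem.Dict.ofList [('I', 1), ('V', 5), ('X', 10), ('L', 50), ('C', 100), ('D', 500), ('M', 1000)]

-- A's loop over reversed(s): carries (total, prev), returns None at the first unmapped char.
def pvRomanLoopA : List Char → Int → Int → Option Int
  | [], total, _ => some total
  | c :: rest, total, prev =>
    match pvRomanMap.get? c with
    | none => none
    | some v => pvRomanLoopA rest (if v < prev then total - v else total + v) v

def roman_to_int_py (s : String) : Option Int :=
  pvRomanLoopA ((PySem.Str.upper s).toList.reverse) 0 0

-- A's 'for keyword in …: if clean.startswith(keyword): return False' loop.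
def pvKwLoopA : List String → String → Bool
  | [], _ => false
  | k :: ks, clean =>
    if PySem.Str.startswith clean k then true else pvKwLoopA ks clean

def is_valid_numbered_header_py (num_str : String) (phrase : String) (expected_number : Int) : Bool :=
  if 30 ≤ PySem.Str.len phrase then false
  else
    let clean := PySem.Str.strip (PySem.Str.upper phrase)
    if pvKwLoopA pvKeywords clean then false
    else
      if PySem.Str.strIsdigit num_str then
        -- num_str.isdigit() holds here, so int(num_str) cannot raise; getD 0 is never the default
        decide ((PySem.Int.ofStr? num_str).getD 0 = expected_number)
      else
        match roman_to_int_py num_str with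
        | none => false
        | some v => decide (v = expected_number)

-- ===== PORT B =====
def pvKeywordsB : List String :=
  ["FIGURE", "FIG", "FIG.", "TABLE", "TAB", "TAB.",
   "IMAGE", "IMG", "IMG.", "CHART", "GRAPH", "DIAGRAM", "EQ", "EQUATION"]

-- Source B's _roman_value: an if/elif chain, no dict.
def pvRomanVal (c : Char) : Option Int :=
  if c = 'I' then some 1
  else if c = 'V' then some 5
  else if c = 'X' then some 10
  else if c = 'L' then some 50
  else if c = 'C' then some 100
  else if c = 'D' then some 500
  else if c = 'M' then some 1000
  else none

-- Source B's vals-building loop: collect the symbol values, None at the first unmapped char.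
def pvCollectVals : List Char → Option (List Int)
  | [] => some []
  | c :: cs =>
    match pvRomanVal c with
    | none => none
    | some v => (pvCollectVals cs).map (v :: ·)

-- Source B's 'sum(-v if v < nxt else v for v, nxt in zip(vals, vals[1:] + [0]))'.
def pvSigned (vs : List Int) : Int :=
  ((vs.zip (vs.drop 1 ++ [0])).map (fun p => if p.1 < p.2 then -p.1 else p.1)).sum

def parse_number (s : String) : Option Int :=
  if PySem.Str.strIsdigit s then
    -- isdigit holds, so int(s) cannot raise; getD 0 is never the default
    some ((PySem.Int.ofStr? s).getD 0)
  else
    (pvCollectVals (PySem.Str.upper s).toList).map pvSigned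

def is_valid_numbered_header_py_alt (num_str : String) (phrase : String) (expected_number : Int) : Bool :=
  let clean := PySem.Str.strip (PySem.Str.upper phrase)
  decide (PySem.Str.len phrase < 30)
    && !(pvKeywordsB.any (fun k => PySem.Str.startswith clean k))
    && decide (parse_number num_str = some expected_number)

-- ===== PRECONDITION & SPEC =====
def Spec_is_valid_numbered_header_py (num_str : String) (phrase : String) (expected_number : Int) (out : Bool) : Prop := out = is_valid_numbered_header_py_alt num_str phrase expected_number
instance (num_str : String) (phrase : String) (expected_number : Int) (out : Bool) : Decidable (Spec_is_valid_numbered_header_py num_str phrase expected_number out) := by unfold Spec_is_valid_numbered_header_py; infer_instance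

-- ===== CLAIM (what is proved, stated in full; the proofs are below) =====
def Claim_equal_is_valid_numbered_header_py : Prop := ∀ (num_str : String) (phrase : String) (expected_number : Int), Dom_is_valid_numbered_header_py num_str phrase expected_number → Spec_is_valid_numbered_header_py num_str phrase expected_number (is_valid_numbered_header_py num_str phrase expected_number)

-- ===== LEMMAS AND PROOFS =====

-- A's right-to-left accumulator as a pure function of the value list (prev carried).
def pvHA : List Int → Int → Int
  | [], _ => 0
  | v :: ws, prev => (if v < prev then -v else v) + pvHA ws v

theorem pvKwLoopA_eq_any (ks : List String) (clean : String) :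
    pvKwLoopA ks clean = ks.any (fun k => PySem.Str.startswith clean k) := by
  induction ks with
  | nil => rfl
  | cons k ks ih => simp [pvKwLoopA, List.any_cons, ih]

theorem pvRomanMap_get_eq (c : Char) : pvRomanMap.get? c = pvRomanVal c := by
  have h : pvRomanMap = PySem.Dict.mk
      [('I', 1), ('V', 5), ('X', 10), ('L', 50), ('C', 100), ('D', 500), ('M', 1000)] := by decide
  by_cases h1 : c = 'I'; · subst h1; decide
  by_cases h2 : c = 'V'; · subst h2; decide
  by_cases h3 : c = 'X'; · subst h3; decide
  by_cases h4 : c = 'L'; · subst h4; decide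
  by_cases h5 : c = 'C'; · subst h5; decide
  by_cases h6 : c = 'D'; · subst h6; decide
  by_cases h7 : c = 'M'; · subst h7; decide
  rw [h]
  simp only [PySem.Dict.get?_mk_cons, beq_iff_eq]
  rw [if_neg (fun hh => h1 hh.symm), if_neg (fun hh => h2 hh.symm), if_neg (fun hh => h3 hh.symm),
      if_neg (fun hh => h4 hh.symm), if_neg (fun hh => h5 hh.symm), if_neg (fun hh => h6 hh.symm),
      if_neg (fun hh => h7 hh.symm)]
  unfold pvRomanVal
  rw [if_neg h1, if_neg h2, if_neg h3, if_neg h4, if_neg h5, if_neg h6, if_neg h7]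
  rfl

theorem pvRomanLoopA_eq (l : List Char) : ∀ (total prev : Int),
    pvRomanLoopA l total prev = (pvCollectVals l).map (fun ws => total + pvHA ws prev) := by
  induction l with
  | nil => intro total prev; simp [pvRomanLoopA, pvCollectVals, pvHA]
  | cons c cs ih =>
    intro total prev
    show (match pvRomanMap.get? c with
      | none => none
      | some v => pvRomanLoopA cs (if v < prev then total - v else total + v) v)
      = _
    rw [pvRomanMap_get_eq]
    cases h : pvRomanVal c with
    | none => simp [pvCollectVals, h]
    | some v =>
      simp only [pvCollectVals, h, ih]
      cases pvCollectVals cs with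
      | none => rfl
      | some ws => simp [pvHA]; split_ifs <;> ring

theorem pvCollectVals_append (l₁ l₂ : List Char) :
    pvCollectVals (l₁ ++ l₂) = (pvCollectVals l₁).bind (fun a => (pvCollectVals l₂).map (a ++ ·)) := by
  induction l₁ with
  | nil => simp only [List.nil_append, pvCollectVals]; cases pvCollectVals l₂ <;> simp
  | cons c cs ih =>
    simp only [List.cons_append, pvCollectVals, ih]
    cases pvRomanVal c with
    | none => rfl
    | some v =>
      cases pvCollectVals cs with
      | none => rfl
      | some a => cases pvCollectVals l₂ <;> simp

theorem pvCollectVals_reverse (l : List Char) :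
    pvCollectVals l.reverse = (pvCollectVals l).map List.reverse := by
  induction l with
  | nil => rfl
  | cons c cs ih =>
    rw [List.reverse_cons, pvCollectVals_append, ih]
    simp only [pvCollectVals]
    cases pvRomanVal c with
    | none => cases pvCollectVals cs <;> rfl
    | some v => cases pvCollectVals cs <;> simp

theorem pvHA_append (l : List Int) (v : Int) : ∀ prev,
    pvHA (l ++ [v]) prev = pvHA l prev + (if v < l.getLastD prev then -v else v) := by
  induction l with
  | nil => intro prev; simp [pvHA]
  | cons w l ih =>
    intro prev
    simp only [List.cons_append, pvHA, ih w, List.getLastD_cons]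
    ring

theorem pvSigned_cons (v : Int) (vs : List Int) :
    pvSigned (v :: vs) = (if v < vs.headD 0 then -v else v) + pvSigned vs := by
  cases vs <;> simp [pvSigned]

theorem pvHA_reverse (vs : List Int) : pvHA vs.reverse 0 = pvSigned vs := by
  induction vs with
  | nil => rfl
  | cons v vs ih =>
    rw [List.reverse_cons, pvHA_append, ih, pvSigned_cons]
    have hlast : (vs.reverse).getLastD 0 = vs.headD 0 := by
      cases vs with
      | nil => rfl
      | cons w vs' =>
        simp [List.getLastD_eq_getLast?, List.getLast?_reverse]
    rw [hlast]; ring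

theorem roman_eq (s : String) :
    roman_to_int_py s = (pvCollectVals (PySem.Str.upper s).toList).map pvSigned := by
  unfold roman_to_int_py
  rw [pvRomanLoopA_eq, pvCollectVals_reverse]
  cases h : pvCollectVals (PySem.Str.upper s).toList with
  | none => rfl
  | some vs =>
    simp only [Option.map_some]
    rw [zero_add, pvHA_reverse vs]

-- ===== VERDICT (by name: the statement is the Claim_ definition above) =====
theorem is_valid_numbered_header_py_spec : Claim_equal_is_valid_numbered_header_py := by
  intro num_str phrase expected_number _
  unfold Spec_is_valid_numbered_header_py
  unfold is_valid_numbered_header_py is_valid_numbered_header_py_alt parse_number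
  simp only [pvKwLoopA_eq_any, roman_eq, show pvKeywordsB = pvKeywords from rfl]
  by_cases hlen : 30 ≤ PySem.Str.len phrase
  · rw [if_pos hlen, decide_eq_false (by omega : ¬ PySem.Str.len phrase < 30)]
    simp
  · rw [if_neg hlen, decide_eq_true (by omega : PySem.Str.len phrase < 30), Bool.true_and]
    cases hkw : pvKeywords.any (fun k =>
        PySem.Str.startswith (PySem.Str.strip (PySem.Str.upper phrase)) k) with
    | true => simp
    | false =>
      simp only [Bool.not_false, Bool.true_and, Bool.false_eq_true, if_false]
      cases hd : PySem.Str.strIsdigit num_str with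
      | true => simp
      | false =>
        simp only [Bool.false_eq_true, if_false]
        cases pvCollectVals (PySem.Str.upper num_str).toList with
        | none => simp
        | some vs => simp
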